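-- pv_equiv track=rewrite | github.com/cburdine/nisq-open-quantum-systems | open_quantum_systems/math_util.py | enumerate_subbasis_strings
-- ===== SOURCE A (Python) =====
-- def enumerate_subbasis_strings(basis_str):
--     """Enumerates all sub-basis strings of a given Pauli basis string
--
--     Args:
--         basis_str (str): A basis measurement Pauli string (cannot contain any I's)
--
--     Yields:
--         str: A subbasis string of the given measurement basis
--     """
--     assert 'I' not in basis_str
--     for mask in range(1<<len(basis_str)):
--         subbasis_str = [
--             ch if mask&(1<<i) else 'I'
--             for i, ch in enumerate(basis_str)
--         ]
--         yield ''.join(subbasis_str)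
-- ===== SOURCE B (Python) =====
-- def enumerate_subbasis_strings(basis_str):
--     """Enumerates all sub-basis strings of a given Pauli basis string
--
--     Recursive generator: builds the string position by position; position 0
--     varies fastest, matching the bitmask (LSB = char 0) enumeration order.
--     """
--     assert 'I' not in basis_str
--
--     def gen(i):
--         if i == len(basis_str):
--             yield ''
--         else:
--             ch = basis_str[i]
--             for rest in gen(i + 1):
--                 yield 'I' + rest
--                 yield ch + rest
--
--     yield from gen(0)
-- ===== Notes on version B (the rewrite author's own statement) =====
-- stated objective: alternative
-- what changed: Replaces the bitmask loop (one mask per output, inner pass decoding each bit) with a recursive generator that builds each subbasis string position by position, the innermost pair of yields making position 0 vary fastest so the bitmask order is reproduced exactly.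
import Mathlib
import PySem

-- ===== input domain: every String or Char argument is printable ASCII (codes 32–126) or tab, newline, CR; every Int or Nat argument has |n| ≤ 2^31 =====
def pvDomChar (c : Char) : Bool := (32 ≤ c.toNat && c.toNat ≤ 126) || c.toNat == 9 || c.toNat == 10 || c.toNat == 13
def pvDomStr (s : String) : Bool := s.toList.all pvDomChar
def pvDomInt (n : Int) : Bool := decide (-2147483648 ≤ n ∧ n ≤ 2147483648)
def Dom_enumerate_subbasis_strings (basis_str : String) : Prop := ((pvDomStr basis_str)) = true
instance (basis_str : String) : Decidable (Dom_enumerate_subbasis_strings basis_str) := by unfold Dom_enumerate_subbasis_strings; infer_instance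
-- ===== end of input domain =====

-- B replaces A's bitmask loop with a recursive position-by-position generator (same order, same cost); return-value equivalence only (both are generators in Python).

-- ===== PORT A =====
-- the list comprehension of A: one subbasis string for a given mask (pairs (ch, i) from enumerate)
def pvRow (chars : List Char) (mask : Nat) : List Char :=
  chars.zipIdx.map (fun p => if mask &&& (1 <<< p.2) ≠ 0 then p.1 else 'I')

def enumerate_subbasis_strings (basis_str : String) : List String :=
  (List.range (2 ^ basis_str.toList.length)).map (fun mask => String.mk (pvRow basis_str.toList mask))

-- ===== PORT B =====
-- B's recursive generator gen(i): yields, for the remaining positions, 'I'+rest then ch+rest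
def pvAltGen : List Char → List (List Char)
  | [] => [[]]
  | ch :: rest => (pvAltGen rest).flatMap (fun r => ['I' :: r, ch :: r])

def enumerate_subbasis_strings_alt (basis_str : String) : List String :=
  (pvAltGen basis_str.toList).map String.mk

-- ===== PRECONDITION & SPEC =====
-- A's `assert 'I' not in basis_str` raises AssertionError on strings containing 'I' (B asserts the same); those inputs are excluded.
def Pre_enumerate_subbasis_strings (basis_str : String) : Prop := 'I' ∉ basis_str.toList
instance (basis_str : String) : Decidable (Pre_enumerate_subbasis_strings basis_str) := by unfold Pre_enumerate_subbasis_strings; infer_instance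
def pvWitness_enumerate_subbasis_strings : String := "XY"

def Spec_enumerate_subbasis_strings (basis_str : String) (out : List String) : Prop := out = enumerate_subbasis_strings_alt basis_str
instance (basis_str : String) (out : List String) : Decidable (Spec_enumerate_subbasis_strings basis_str out) := by unfold Spec_enumerate_subbasis_strings; infer_instance

-- ===== CLAIM (what is proved, stated in full; the proofs are below) =====
def Claim_equal_enumerate_subbasis_strings : Prop := ∀ (basis_str : String), Dom_enumerate_subbasis_strings basis_str → Pre_enumerate_subbasis_strings basis_str → Spec_enumerate_subbasis_strings basis_str (enumerate_subbasis_strings basis_str)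

-- ===== LEMMAS AND PROOFS =====
theorem pvBit_succ (mask i : Nat) :
    (mask &&& (1 <<< (i + 1)) ≠ 0) = ((mask / 2) &&& (1 <<< i) ≠ 0) := by
  simp [Nat.one_shiftLeft, Nat.and_two_pow, ← Nat.testBit_succ]

theorem pvRow_cons (c : Char) (cs : List Char) (mask : Nat) :
    pvRow (c :: cs) mask = (if mask &&& 1 ≠ 0 then c else 'I') :: pvRow cs (mask / 2) := by
  unfold pvRow
  simp only [List.zipIdx, List.zipIdx_succ, List.map_cons, List.map_map]
  congr 1
  apply List.map_congr_left
  intro p _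
  simp only [Function.comp, pvBit_succ]

theorem pvRange_two_mul (k : Nat) :
    List.range (2 * k) = (List.range k).flatMap (fun m => [2 * m, 2 * m + 1]) := by
  induction k with
  | zero => rfl
  | succ k ih =>
    have h : 2 * (k + 1) = (2 * k) + 1 + 1 := by ring
    rw [h, List.range_succ, List.range_succ, List.range_succ, ih]
    simp

theorem pvBit0_even (m : Nat) : (2 * m) &&& 1 = 0 := by
  have := Nat.and_two_pow (2 * m) 0
  simp [Nat.testBit_zero] at this
  simpa [Nat.mul_mod_right] using this

theorem pvBit0_odd (m : Nat) : (2 * m + 1) &&& 1 ≠ 0 := by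
  have h1 : (2 * m + 1) &&& 1 = ((2 * m + 1).testBit 0).toNat * 2 ^ 0 := Nat.and_two_pow _ 0
  have h2 : (2 * m + 1) % 2 = 1 := by omega
  simp [h1, Nat.testBit_zero, h2]

theorem pvMain (cs : List Char) :
    (List.range (2 ^ cs.length)).map (pvRow cs) = pvAltGen cs := by
  induction cs with
  | nil => rfl
  | cons c cs ih =>
    have hp : 2 ^ (c :: cs).length = 2 * 2 ^ cs.length := by
      simp [List.length_cons, pow_succ, Nat.mul_comm]
    rw [hp, pvRange_two_mul, List.map_flatMap]
    show (List.range (2 ^ cs.length)).flatMap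
        (fun m => [pvRow (c :: cs) (2 * m), pvRow (c :: cs) (2 * m + 1)]) = _
    have hstep : ∀ m : Nat,
        [pvRow (c :: cs) (2 * m), pvRow (c :: cs) (2 * m + 1)]
          = ['I' :: pvRow cs m, c :: pvRow cs m] := by
      intro m
      rw [pvRow_cons, pvRow_cons, if_neg (by simpa using pvBit0_even m),
          if_pos (pvBit0_odd m)]
      have h1 : 2 * m / 2 = m := by omega
      have h2 : (2 * m + 1) / 2 = m := by omega
      rw [h1, h2]
    rw [List.flatMap_congr (fun m _ => hstep m)]
    show _ = (pvAltGen cs).flatMap (fun r => ['I' :: r, c :: r])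
    rw [← ih, List.flatMap_map]

-- ===== VERDICT (by name: the statement is the Claim_ definition above) =====
theorem enumerate_subbasis_strings_spec : Claim_equal_enumerate_subbasis_strings := by
  intro basis_str _ _
  unfold Spec_enumerate_subbasis_strings enumerate_subbasis_strings enumerate_subbasis_strings_alt
  rw [← pvMain basis_str.toList, List.map_map]
  rfl
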